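-- pv_equiv track=rewrite | github.com/gagan-acharya/Python-Development-with-Django-JumpWhere | Assignment6/17.py | func
-- ===== SOURCE A (Python) =====
-- def func(x, y):
-- 	prime_list = []
-- 	even_list = []
-- 	odd_list = []
-- 	for i in range(x, y):
-- 		if i == 0:
-- 			continue
-- 		if i == 1:
-- 			odd_list.append(i)
-- 			continue
-- 		else:
-- 			if i%2==0:
-- 				even_list.append(i)
-- 			else:
-- 				odd_list.append(i)
-- 			for j in range(2, int(i/2)+1):
-- 				if i % j == 0:
-- 					break
-- 			else:
-- 				prime_list.append(i)
-- 	return even_list,odd_list,prime_list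
-- ===== SOURCE B (Python) =====
-- def func(x, y):
--     # Three independent passes over the range; primality by trial division
--     # only up to j*j <= i (instead of A's scan up to int(i/2)).  For i < 0 the
--     # while loop never runs, so negatives land in prime_list exactly as in A.
--     def _has_factor(i):
--         j = 2
--         while j * j <= i:
--             if i % j == 0:
--                 return True
--             j += 1
--         return False
--
--     even_list = [i for i in range(x, y) if i != 0 and i % 2 == 0]
--     odd_list = [i for i in range(x, y) if i % 2 != 0]
--     prime_list = [i for i in range(x, y) if i != 0 and i != 1 and not _has_factor(i)]
--     return even_list, odd_list, prime_list
-- ===== Notes on version B (the rewrite author's own statement) =====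
-- stated objective: alternative
-- what changed: A's single interleaved loop with a break/else trial-division inner scan up to int(i/2) is replaced by three independent filter passes with trial division stopped at j*j <= i (sqrt bound).
import Mathlib
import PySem

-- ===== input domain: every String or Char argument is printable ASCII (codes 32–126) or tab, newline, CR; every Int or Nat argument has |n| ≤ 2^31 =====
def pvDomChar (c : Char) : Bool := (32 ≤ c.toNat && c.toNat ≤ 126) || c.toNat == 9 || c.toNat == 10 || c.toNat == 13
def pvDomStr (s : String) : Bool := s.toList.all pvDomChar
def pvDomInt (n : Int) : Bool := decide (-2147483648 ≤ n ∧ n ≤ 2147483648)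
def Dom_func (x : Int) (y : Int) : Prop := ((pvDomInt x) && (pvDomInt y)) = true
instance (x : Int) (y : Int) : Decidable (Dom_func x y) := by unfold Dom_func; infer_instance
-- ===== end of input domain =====

-- B replaces A's single interleaved loop (trial division up to int(i/2)) by three
-- independent filter passes with trial division stopped at j*j <= i.

-- ===== PORT A =====
-- inner 'for j in range(2, int(i/2)+1): if i%j==0: break / else:' — the else fires iff no j divides i.
-- int(i/2) is truncating division; exact for |i| ≤ 2^31 (float is exact there), ported as Int.tdiv.
def funcAnyDiv (i : Int) : Bool :=
  (PySem.List.pyRange 2 (Int.tdiv i 2 + 1) 1).any (fun j => PySem.Int.mod i j == 0)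

def funcStep (acc : List Int × List Int × List Int) (i : Int) : List Int × List Int × List Int :=
  let ev := acc.1; let od := acc.2.1; let pr := acc.2.2
  if i == 0 then (ev, od, pr)
  else if i == 1 then (ev, od ++ [i], pr)
  else
    let ev' := if PySem.Int.mod i 2 == 0 then ev ++ [i] else ev
    let od' := if PySem.Int.mod i 2 == 0 then od else od ++ [i]
    if funcAnyDiv i then (ev', od', pr) else (ev', od', pr ++ [i])

def func (x : Int) (y : Int) : List Int × List Int × List Int :=
  (PySem.List.pyRange x y 1).foldl funcStep ([], [], [])

-- ===== PORT B =====
-- Source B's while loop 'j = 2; while j*j <= i: ...'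
def hasFactorAux (i : Int) (j : Int) : Bool :=
  if h : j * j ≤ i then
    if PySem.Int.mod i j == 0 then true else hasFactorAux i (j + 1)
  else false
termination_by (i + 1 - j).toNat
decreasing_by
  have hj : j ≤ i := by nlinarith [mul_self_nonneg (j - 1), mul_self_nonneg j]
  omega

def func_alt (x : Int) (y : Int) : List Int × List Int × List Int :=
  ((PySem.List.pyRange x y 1).filter (fun i => i != 0 && PySem.Int.mod i 2 == 0),
   (PySem.List.pyRange x y 1).filter (fun i => PySem.Int.mod i 2 != 0),
   (PySem.List.pyRange x y 1).filter (fun i => i != 0 && i != 1 && !(hasFactorAux i 2)))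

-- ===== PRECONDITION & SPEC =====
def Spec_func (x : Int) (y : Int) (out : List Int × List Int × List Int) : Prop := out = func_alt x y
instance (x : Int) (y : Int) (out : List Int × List Int × List Int) : Decidable (Spec_func x y out) := by unfold Spec_func; infer_instance

-- ===== CLAIM (what is proved, stated in full; the proofs are below) =====
def Claim_equal_func : Prop := ∀ (x : Int) (y : Int), Dom_func x y → Spec_func x y (func x y)

-- ===== LEMMAS AND PROOFS =====

-- the three Bool predicates of B
def pEv (i : Int) : Bool := i != 0 && PySem.Int.mod i 2 == 0
def pOd (i : Int) : Bool := PySem.Int.mod i 2 != 0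
def pPrB (i : Int) : Bool := i != 0 && i != 1 && !(hasFactorAux i 2)
-- A's prime predicate
def pPrA (i : Int) : Bool := i != 0 && i != 1 && !(funcAnyDiv i)

lemma hasFactorAux_iff (n : Nat) : ∀ (i j : Int), (i + 1 - j).toNat = n → 2 ≤ j →
    (hasFactorAux i j = true ↔ ∃ k : Int, j ≤ k ∧ k * k ≤ i ∧ PySem.Int.mod i k = 0) := by
  induction n using Nat.strong_induction_on with
  | _ n ih =>
    intro i j hn hj
    rw [hasFactorAux]
    by_cases h : j * j ≤ i
    · have hji : j ≤ i := by nlinarith [mul_self_nonneg (j - 1)]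
      by_cases hm : PySem.Int.mod i j = 0
      · simp [h, hm]
        exact ⟨j, le_refl j, h, hm⟩
      · have hrec := ih ((i + 1 - (j + 1)).toNat) (by omega) i (j + 1) rfl (by omega)
        simp only [h, dif_pos, hm]
        simp only [show (PySem.Int.mod i j == 0) = false by simp [hm]]
        rw [if_neg (by simp)]
        rw [hrec]
        constructor
        · rintro ⟨k, hk1, hk2, hk3⟩; exact ⟨k, by omega, hk2, hk3⟩
        · rintro ⟨k, hk1, hk2, hk3⟩
          rcases eq_or_lt_of_le hk1 with rfl | hlt
          · exact absurd hk3 hm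
          · exact ⟨k, by omega, hk2, hk3⟩
    · simp [h]
      intro k hk1 hk2
      exfalso
      have : j * j ≤ k * k := by nlinarith
      omega

-- divisor pairing: a divisor ≤ i/2 exists iff one with square ≤ i exists (i ≥ 2)
lemma divisor_pair (i : Int) (hi : 2 ≤ i) :
    (∃ j : Int, 2 ≤ j ∧ j ≤ i / 2 ∧ i % j = 0) ↔ (∃ j : Int, 2 ≤ j ∧ j * j ≤ i ∧ i % j = 0) := by
  constructor
  · rintro ⟨j, hj2, hjh, hjd⟩
    have hjpos : 0 < j := by omega
    have hdvd : j ∣ i := Int.dvd_of_emod_eq_zero hjd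
    obtain ⟨k, hk⟩ := hdvd
    have h2j : 2 * j ≤ i := by omega
    have hk2 : 2 ≤ k := by nlinarith
    by_cases hsq : j * j ≤ i
    · exact ⟨j, hj2, hsq, hjd⟩
    · exact ⟨k, hk2, by nlinarith, Int.emod_eq_zero_of_dvd ⟨j, by rw [hk]; ring⟩⟩
  · rintro ⟨j, hj2, hsq, hjd⟩
    have hjpos : 0 < j := by omega
    obtain ⟨k, hk⟩ := Int.dvd_of_emod_eq_zero hjd
    have hkj : j ≤ k := by nlinarith
    have : 2 * j ≤ i := by nlinarith
    exact ⟨j, hj2, by omega, hjd⟩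

lemma anyDiv_eq_hasFactor (i : Int) : funcAnyDiv i = hasFactorAux i 2 := by
  have hchar := hasFactorAux_iff (i + 1 - 2).toNat i 2 rfl (by omega)
  by_cases hneg : i < 2
  · -- range(2, tdiv i 2 + 1) is empty and 2*2 ≤ i fails
    have htd : Int.tdiv i 2 + 1 ≤ 2 := by
      have := Int.tdiv_le_tdiv (by omega : (0:Int) < 2) (show i ≤ 3 by omega)
      simp at this; omega
    rw [funcAnyDiv, PySem.List.pyRange_one_eq_nil htd]
    rw [hasFactorAux]
    simp
    intro h; exact absurd h (by omega)
  · push_neg at hneg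
    have htd : Int.tdiv i 2 = i / 2 := Int.tdiv_eq_ediv_of_nonneg (by omega)
    rw [Bool.eq_iff_iff]
    rw [funcAnyDiv, List.any_eq_true, hchar]
    constructor
    · rintro ⟨j, hjmem, hjd⟩
      rw [PySem.List.mem_pyRange_one] at hjmem
      have hmod : PySem.Int.mod i j = i % j := PySem.Int.mod_eq_emod_of_pos (by omega)
      have : ∃ j : Int, 2 ≤ j ∧ j ≤ i / 2 ∧ i % j = 0 :=
        ⟨j, hjmem.1, by omega, by simpa [hmod] using hjd⟩
      obtain ⟨k, hk2, hksq, hkd⟩ := (divisor_pair i hneg).mp this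
      exact ⟨k, hk2, hksq, by rw [PySem.Int.mod_eq_emod_of_pos (by omega)]; exact hkd⟩
    · rintro ⟨k, hk2, hksq, hkd⟩
      have hkd' : i % k = 0 := by rw [PySem.Int.mod_eq_emod_of_pos (by omega)] at hkd; exact hkd
      obtain ⟨j, hj2, hjh, hjd⟩ := (divisor_pair i hneg).mpr ⟨k, hk2, hksq, hkd'⟩
      refine ⟨j, ?_, ?_⟩
      · rw [PySem.List.mem_pyRange_one]; omega
      · simp [PySem.Int.mod_eq_emod_of_pos (show (0:Int) < j by omega), hjd]

lemma pPrA_eq_pPrB (i : Int) : pPrA i = pPrB i := by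
  rw [pPrA, pPrB, anyDiv_eq_hasFactor]

lemma funcStep_eq (acc : List Int × List Int × List Int) (i : Int) :
    funcStep acc i = (acc.1 ++ (if pEv i then [i] else []),
                      acc.2.1 ++ (if pOd i then [i] else []),
                      acc.2.2 ++ (if pPrA i then [i] else [])) := by
  obtain ⟨e, o, p⟩ := acc
  by_cases h0 : i = 0
  · subst h0; simp [funcStep, pEv, pOd, pPrA]
  · by_cases h1 : i = 1
    · subst h1; simp [funcStep, pEv, pOd, pPrA]
    · have hm : PySem.Int.mod i 2 = i % 2 := PySem.Int.mod_eq_emod_of_pos (by omega)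
      rcases Int.emod_two_eq_zero_or_one i with h2 | h2 <;>
        by_cases hd : funcAnyDiv i <;>
          simp [funcStep, pEv, pOd, pPrA, h0, h1, h2, hd]

lemma foldl_funcStep (L : List Int) : ∀ (e o p : List Int),
    L.foldl funcStep (e, o, p) =
      (e ++ L.filter pEv, o ++ L.filter pOd, p ++ L.filter pPrA) := by
  induction L with
  | nil => intro e o p; simp
  | cons a L ih =>
    intro e o p
    rw [List.foldl_cons, funcStep_eq, ih]
    by_cases hE : pEv a <;> by_cases hO : pOd a <;> by_cases hP : pPrA a <;>
      simp [List.filter_cons, hE, hO, hP]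

-- ===== VERDICT (by name: the statement is the Claim_ definition above) =====
theorem func_spec : Claim_equal_func := by
  intro x y _
  unfold Spec_func func func_alt
  rw [foldl_funcStep]
  have hP : (PySem.List.pyRange x y 1).filter pPrA = (PySem.List.pyRange x y 1).filter pPrB :=
    List.filter_congr (fun a _ => pPrA_eq_pPrB a)
  simp only [List.nil_append, hP]
  rfl
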